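-- pv_equiv track=rewrite | github.com/petitechose-midi-studio/core | resource/code/py/protocol/generators/java/struct_generator.py | _sanitize_var_name
-- ===== SOURCE A (Python) =====
-- def _sanitize_var_name(field_expr: str) -> str:
--     """
--     Sanitize field expression to create valid Java variable name.
--
--     Examples:
--         pageInfo.getPageIndex() → pageInfo_pageIndex
--         item.getParameterValue() → item_parameterValue
--         deviceName → deviceName
--     """
--     # Remove parentheses
--     name: str = field_expr.replace('()', '')
--     # Replace dot with underscore
--     name = name.replace('.', '_')
--     # Remove 'get' prefix after dot if present
--     if '_get' in name:
--         parts: list[str] = name.split('_')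
--         result: list[str] = []
--         for part in parts:
--             if part.startswith('get') and len(part) > 3:
--                 # Remove 'get' and lowercase first letter
--                 result.append(part[3].lower() + part[4:])
--             else:
--                 result.append(part)
--         name = '_'.join(result)
--     return name
-- ===== SOURCE B (Python) =====
-- def _sanitize_var_name(field_expr: str) -> str:
--     # One-pass state-machine scanner instead of split/transform/join.
--     name = field_expr.replace('()', '').replace('.', '_')
--     if '_get' in name:
--         out = []
--         at_start = True  # at the start of the string or just after '_'
--         i = 0
--         n = len(name)
--         while i < n:
--             if (at_start and name.startswith('get', i)
--                     and i + 3 < n and name[i + 3] != '_'):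
--                 out.append(name[i + 3].lower())
--                 i += 4
--                 at_start = False
--             else:
--                 c = name[i]
--                 out.append(c)
--                 at_start = (c == '_')
--                 i += 1
--         name = ''.join(out)
--     return name
-- ===== Notes on version B (the rewrite author's own statement) =====
-- stated objective: alternative
-- what changed: Replaces the split-on-'_' / per-part transform / rejoin pipeline with a single left-to-right state-machine scan that tracks whether it is at a segment start and strips 'get' prefixes in place.
import Mathlib
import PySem

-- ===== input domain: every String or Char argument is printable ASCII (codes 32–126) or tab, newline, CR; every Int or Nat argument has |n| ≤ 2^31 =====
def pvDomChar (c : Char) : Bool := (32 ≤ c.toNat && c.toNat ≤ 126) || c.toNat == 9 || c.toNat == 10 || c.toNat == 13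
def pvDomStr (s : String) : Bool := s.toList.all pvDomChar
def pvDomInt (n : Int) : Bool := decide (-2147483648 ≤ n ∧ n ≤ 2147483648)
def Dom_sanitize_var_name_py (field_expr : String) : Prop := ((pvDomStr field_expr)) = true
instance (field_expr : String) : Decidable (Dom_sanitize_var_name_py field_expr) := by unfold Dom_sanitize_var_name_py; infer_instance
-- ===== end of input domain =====

-- B replaces A's split-on-'_' / per-part transform / rejoin pipeline by a one-pass state-machine scan (objective: alternative).

-- ===== PORT A =====
-- the loop body: part[3].lower() + part[4:] under the guard part.startswith('get') and len(part) > 3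
def pvSanitizePart (part : List Char) : List Char :=
  if PySem.Chars.startswith part ['g', 'e', 't'] && decide (3 < PySem.Chars.len part) then
    match PySem.List.pyGet? part 3 with
    | some ch => PySem.Chars.lower [ch] ++ PySem.List.slice part (some 4) none
    | none => part
  else part

-- the body after the two replaces: the '_get' guard, split('_'), per-part loop into `result`, '_'.join
def pvAcore (name : List Char) : List Char :=
  if PySem.Chars.isIn ['_', 'g', 'e', 't'] name then
    PySem.Chars.join ['_']
      ((PySem.Chars.splitOn name ['_']).foldl (fun acc part => acc ++ [pvSanitizePart part]) [])
  else name

def sanitize_var_name_py (field_expr : String) : String :=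
  String.ofList (pvAcore (PySem.Chars.replace (PySem.Chars.replace field_expr.toList ['(', ')'] []) ['.'] ['_']))

-- ===== PORT B =====
-- the while-loop condition of Source B at suffix l = name[i:]:
-- at_start and name.startswith('get', i) and i+3 < len(name) and name[i+3] != '_'
def pvBcond (l : List Char) : Bool :=
  PySem.Chars.startswith l ['g', 'e', 't'] && decide (3 < PySem.Chars.len l)
    && (PySem.List.pyGet? l 3 != some '_')

-- the while loop of Source B, one pass over the suffix; `atStart` = at string start or just after '_'
def pvBscan : Bool → List Char → List Char
  | _, [] => []
  | atStart, c :: rest =>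
    if atStart && pvBcond (c :: rest) then
      (match PySem.List.pyGet? (c :: rest) 3 with
       | some d => PySem.Chars.lowerChar d
       | none => c) :: pvBscan false (rest.drop 3)
    else c :: pvBscan (c == '_') rest
  termination_by _ l => l.length
  decreasing_by all_goals (simp; try omega)

def pvBcore (name : List Char) : List Char :=
  if PySem.Chars.isIn ['_', 'g', 'e', 't'] name then pvBscan true name else name

def sanitize_var_name_py_alt (field_expr : String) : String :=
  String.ofList (pvBcore (PySem.Chars.replace (PySem.Chars.replace field_expr.toList ['(', ')'] []) ['.'] ['_']))

-- ===== PRECONDITION & SPEC =====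
def Spec_sanitize_var_name_py (field_expr : String) (out : String) : Prop := out = sanitize_var_name_py_alt field_expr
instance (field_expr : String) (out : String) : Decidable (Spec_sanitize_var_name_py field_expr out) := by unfold Spec_sanitize_var_name_py; infer_instance

-- ===== CLAIM (what is proved, stated in full; the proofs are below) =====
def Claim_equal_sanitize_var_name_py : Prop := ∀ (field_expr : String), Dom_sanitize_var_name_py field_expr → Spec_sanitize_var_name_py field_expr (sanitize_var_name_py field_expr)

-- ===== LEMMAS AND PROOFS =====

-- fuel-free account of PySem.Chars.splitOn for the one-character separator '_'
def pvSplitAux : List Char → List Char → List (List Char)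
  | [], cur => [cur.reverse]
  | c :: rest, cur => if c = '_' then cur.reverse :: pvSplitAux rest [] else pvSplitAux rest (c :: cur)

lemma pvSplitOn_go_eq (fuel : Nat) : ∀ (l cur : List Char) (acc : List (List Char)),
    l.length < fuel →
    PySem.Chars.splitOn.go ['_'] fuel l cur acc = acc.reverse ++ pvSplitAux l cur := by
  induction fuel with
  | zero => intro l cur acc h; omega
  | succ n ih =>
    intro l cur acc h
    cases l with
    | nil => rw [PySem.Chars.splitOn.go]; simp [pvSplitAux]; omega
    | cons c rest =>
      rw [PySem.Chars.splitOn.go]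
      by_cases hc : c = '_'
      · subst hc
        rw [show ((['_'].isPrefixOf ('_' :: rest)) = true) from by simp [List.isPrefixOf]]
        simp only [List.drop_succ_cons, List.drop_zero, List.length_singleton]
        rw [ih rest [] (cur.reverse :: acc) (by simp at h; omega)]
        simp [pvSplitAux]
      · rw [show ((['_'].isPrefixOf (c :: rest)) = false) from by
          simp [List.isPrefixOf]; exact fun h' => absurd h'.symm hc]
        simp only [Bool.false_eq_true, if_false]
        rw [ih rest (c :: cur) acc (by simp at h ⊢; omega)]
        simp [pvSplitAux, hc]

lemma pvSplitOn_eq (l : List Char) : PySem.Chars.splitOn l ['_'] = pvSplitAux l [] := by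
  unfold PySem.Chars.splitOn
  rw [pvSplitOn_go_eq (l.length + 1) l [] [] (by omega)]
  simp

lemma pvBscan_nil (b : Bool) : pvBscan b [] = [] := by rw [pvBscan]

lemma pvBscan_false (c : Char) (rest : List Char) :
    pvBscan false (c :: rest) = c :: pvBscan (c == '_') rest := by
  rw [pvBscan]; simp

lemma pvBcond_iff (l : List Char) :
    pvBcond l = true ↔ ∃ d r, l = 'g' :: 'e' :: 't' :: d :: r ∧ d ≠ '_' := by
  rcases l with _ | ⟨a, _ | ⟨b, _ | ⟨c, _ | ⟨d, r⟩⟩⟩⟩ <;>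
    simp [pvBcond, PySem.Chars.startswith, List.isPrefixOf, PySem.Chars.len_eq,
      PySem.List.pyGet?_ofNat'] <;> try omega
  intro _
  constructor
  · rintro ⟨⟨ha, hb, hc⟩, -⟩
    exact ⟨ha.symm, hb.symm, hc.symm⟩
  · rintro ⟨ha, hb, hc⟩
    exact ⟨⟨ha.symm, hb.symm, hc.symm⟩, by omega⟩

lemma pvBscan_true_get (d : Char) (r : List Char) (hd : d ≠ '_') :
    pvBscan true ('g' :: 'e' :: 't' :: d :: r) = PySem.Chars.lowerChar d :: pvBscan false r := by
  rw [pvBscan]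
  rw [show pvBcond ('g' :: 'e' :: 't' :: d :: r) = true from (pvBcond_iff _).mpr ⟨d, r, rfl, hd⟩]
  simp [PySem.List.pyGet?_ofNat']

lemma pvBscan_true_other (c : Char) (rest : List Char) (h : pvBcond (c :: rest) = false) :
    pvBscan true (c :: rest) = c :: pvBscan (c == '_') rest := by
  rw [pvBscan]; simp [h]

lemma pvSanitizePart_short (pre : List Char) (h : pre.length ≤ 3) : pvSanitizePart pre = pre := by
  rw [pvSanitizePart, if_neg]
  simp [PySem.Chars.len_eq]; omega

lemma pvSanitizePart_get (d : Char) (r : List Char) :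
    pvSanitizePart ('g' :: 'e' :: 't' :: d :: r) = PySem.Chars.lowerChar d :: r := by
  rw [pvSanitizePart, if_pos]
  · simp [PySem.List.pyGet?_ofNat', PySem.Chars.lower, PySem.List.slice]
  · simp [PySem.Chars.startswith, List.isPrefixOf, PySem.Chars.len_eq]; omega

lemma pvSanitizePart_nonget (a b c d : Char) (r : List Char) (h : ¬(a = 'g' ∧ b = 'e' ∧ c = 't')) :
    pvSanitizePart (a :: b :: c :: d :: r) = a :: b :: c :: d :: r := by
  rw [pvSanitizePart, if_neg]
  simp [PySem.Chars.startswith, List.isPrefixOf]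
  intro ha hb hc
  exact absurd ⟨ha.symm, hb.symm, hc.symm⟩ h

lemma pvSplitAux_ne_nil (l cur : List Char) : pvSplitAux l cur ≠ [] := by
  induction l generalizing cur with
  | nil => simp [pvSplitAux]
  | cons c rest ih => by_cases hc : c = '_' <;> simp [pvSplitAux, hc] <;> exact ih _

lemma pvSplitAux_no_us (pre : List Char) (h : '_' ∉ pre) :
    ∀ cur, pvSplitAux pre cur = [cur.reverse ++ pre] := by
  induction pre with
  | nil => intro cur; simp [pvSplitAux]
  | cons c rest ih =>
    intro cur
    simp at h
    rw [pvSplitAux, if_neg (fun hc => h.1 hc.symm), ih (fun hm => h.2 hm) (c :: cur)]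
    simp

lemma pvSplitAux_split (pre post : List Char) (h : '_' ∉ pre) :
    ∀ cur, pvSplitAux (pre ++ '_' :: post) cur = (cur.reverse ++ pre) :: pvSplitAux post [] := by
  induction pre with
  | nil => intro cur; simp [pvSplitAux]
  | cons c rest ih =>
    intro cur
    simp at h
    rw [List.cons_append, pvSplitAux, if_neg (fun hc => h.1 hc.symm), ih (fun hm => h.2 hm) (c :: cur)]
    simp

lemma pvBscan_false_app (pre : List Char) (h : '_' ∉ pre) (t : List Char) :
    pvBscan false (pre ++ t) = pre ++ pvBscan false t := by
  induction pre with
  | nil => simp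
  | cons c rest ih =>
    simp at h
    rw [List.cons_append, pvBscan_false,
      show (c == '_') = false from by simp; exact fun hc => h.1 hc.symm,
      ih (fun hm => h.2 hm)]
    simp

lemma pvBscan_true_block (pre t : List Char) (h : '_' ∉ pre)
    (ht : t = [] ∨ ∃ post, t = '_' :: post) :
    pvBscan true (pre ++ t) = pvSanitizePart pre ++ pvBscan false t := by
  have hfalse_t : pvBscan true t = pvBscan false t := by
    rcases ht with rfl | ⟨post, rfl⟩
    · rw [pvBscan_nil, pvBscan_nil]
    · have hc : pvBcond ('_' :: post) = false := by
        rw [← Bool.not_eq_true, pvBcond_iff]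
        rintro ⟨d, r, heq, -⟩
        simp at heq
      rw [pvBscan_true_other _ _ hc, pvBscan_false]
  match pre, h with
  | [], _ =>
    rw [List.nil_append, pvSanitizePart_short [] (by simp), List.nil_append, hfalse_t]
  | [a], h =>
    have hc : pvBcond (a :: t) = false := by
      rw [← Bool.not_eq_true, pvBcond_iff]
      rintro ⟨d, rr, heq, hd⟩
      rcases ht with rfl | ⟨post, rfl⟩ <;> simp at heq
    rw [List.cons_append, List.nil_append, pvBscan_true_other _ _ hc,
      show (a == '_') = false from by simp; exact fun hc' => h (by simp [hc']),
      pvSanitizePart_short [a] (by simp)]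
    simp
  | [a, b], h =>
    have hc : pvBcond (a :: b :: t) = false := by
      rw [← Bool.not_eq_true, pvBcond_iff]
      rintro ⟨d, rr, heq, hd⟩
      rcases ht with rfl | ⟨post, rfl⟩ <;> simp at heq
    simp only [List.mem_cons, not_or] at h
    rw [List.cons_append, List.cons_append, List.nil_append, pvBscan_true_other _ _ hc,
      show (a == '_') = false from by simp; exact fun hc' => h.1 hc'.symm,
      pvBscan_false b t,
      show (b == '_') = false from by simp; exact fun hc' => h.2.1 hc'.symm,
      pvSanitizePart_short [a, b] (by simp)]
    simp
  | [a, b, c], h =>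
    have hc : pvBcond (a :: b :: c :: t) = false := by
      rw [← Bool.not_eq_true, pvBcond_iff]
      rintro ⟨d, rr, heq, hd⟩
      rcases ht with rfl | ⟨post, rfl⟩ <;> simp at heq
      exact hd heq.2.2.2.1.symm
    simp only [List.mem_cons, not_or] at h
    rw [List.cons_append, List.cons_append, List.cons_append, List.nil_append,
      pvBscan_true_other _ _ hc,
      show (a == '_') = false from by simp; exact fun hc' => h.1 hc'.symm,
      pvBscan_false b,
      show (b == '_') = false from by simp; exact fun hc' => h.2.1 hc'.symm,
      pvBscan_false c,
      show (c == '_') = false from by simp; exact fun hc' => h.2.2.1 hc'.symm,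
      pvSanitizePart_short [a, b, c] (by simp)]
    simp
  | a :: b :: c :: d :: r, h =>
    simp only [List.mem_cons, not_or] at h
    by_cases habc : a = 'g' ∧ b = 'e' ∧ c = 't'
    · obtain ⟨rfl, rfl, rfl⟩ := habc
      have hd : d ≠ '_' := fun hc' => h.2.2.2.1 hc'.symm
      have hr : '_' ∉ r := fun hm => h.2.2.2.2 hm
      simp only [List.cons_append]
      rw [pvBscan_true_get d _ hd, pvBscan_false_app r hr t, pvSanitizePart_get]
      simp
    · have hc : pvBcond (a :: b :: c :: d :: (r ++ t)) = false := by
        rw [← Bool.not_eq_true, pvBcond_iff]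
        rintro ⟨d', rr, heq, hd'⟩
        simp at heq
        exact habc ⟨heq.1, heq.2.1, heq.2.2.1⟩
      simp only [List.cons_append]
      rw [pvBscan_true_other _ _ hc,
        show (a == '_') = false from by simp; exact fun hc' => h.1 hc'.symm,
        pvBscan_false b,
        show (b == '_') = false from by simp; exact fun hc' => h.2.1 hc'.symm,
        pvBscan_false c,
        show (c == '_') = false from by simp; exact fun hc' => h.2.2.1 hc'.symm,
        pvBscan_false d,
        show (d == '_') = false from by simp; exact fun hc' => h.2.2.2.1 hc'.symm,
        pvBscan_false_app r (fun hm => h.2.2.2.2 hm) t,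
        pvSanitizePart_nonget a b c d r habc]
      simp

lemma pvMain : ∀ (n : Nat) (l : List Char), l.length ≤ n →
    pvBscan true l = PySem.Chars.join ['_'] ((pvSplitAux l []).map pvSanitizePart) := by
  intro n
  induction n with
  | zero =>
    intro l hl
    have : l = [] := by simpa using List.eq_nil_of_length_eq_zero (by omega)
    subst this
    simp [pvSplitAux, pvBscan_nil, PySem.Chars.join_singleton, pvSanitizePart_short]
  | succ n ih =>
    intro l hl
    by_cases hus : '_' ∈ l
    · set p : Char → Bool := fun c => c != '_' with hp
      have hpre : '_' ∉ l.takeWhile p := fun hm => by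
        have := List.mem_takeWhile_imp hm
        simp [hp] at this
      have hdne : l.dropWhile p ≠ [] := by
        rw [Ne, List.dropWhile_eq_nil_iff]
        push_neg
        exact ⟨'_', hus, by simp [hp]⟩
      obtain ⟨post, hpost⟩ : ∃ post, l.dropWhile p = '_' :: post := by
        rcases hd : l.dropWhile p with _ | ⟨c, post⟩
        · exact absurd hd hdne
        · have hdne' : List.dropWhile p l ≠ [] := by rw [hd]; simp
          have h1 := List.head_dropWhile_not p hdne'
          have h2 : some ((List.dropWhile p l).head hdne') = some c := by
            rw [← List.head?_eq_head hdne', hd]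
            rfl
          rw [Option.some.inj h2] at h1
          simp [hp] at h1
          exact ⟨post, by rw [h1]⟩
      have hdecomp : l = l.takeWhile p ++ '_' :: post := by
        conv_lhs => rw [← List.takeWhile_append_dropWhile (p := p) (l := l)]
        rw [hpost]
      have hlen : post.length ≤ n := by
        have := congrArg List.length hdecomp
        simp at this
        omega
      rw [hdecomp, pvBscan_true_block _ _ hpre (Or.inr ⟨post, rfl⟩),
        pvSplitAux_split _ _ hpre, pvBscan_false,
        show ('_' == '_') = true from rfl, ih post hlen]
      rcases hsp : pvSplitAux post [] with _ | ⟨q, qs⟩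
      · exact absurd hsp (pvSplitAux_ne_nil post [])
      · simp only [hsp, List.map_cons, List.reverse_nil, List.nil_append,
          PySem.Chars.join_cons_cons]
        simp
    · rw [pvSplitAux_no_us l hus [], List.reverse_nil, List.nil_append, List.map_singleton,
        PySem.Chars.join_singleton, show l = l ++ [] from by simp,
        pvBscan_true_block l [] hus (Or.inl rfl), pvBscan_nil]
      simp

lemma pvCore_eq (name : List Char) : pvAcore name = pvBcore name := by
  unfold pvAcore pvBcore
  by_cases hg : PySem.Chars.isIn ['_', 'g', 'e', 't'] name = true
  · rw [if_pos hg, if_pos hg, PySem.List.foldl_append_singleton_eq_map, List.nil_append,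
      pvSplitOn_eq]
    exact (pvMain name.length name le_rfl).symm
  · rw [if_neg hg, if_neg hg]

-- ===== VERDICT (by name: the statement is the Claim_ definition above) =====
theorem sanitize_var_name_py_spec : Claim_equal_sanitize_var_name_py := by
  intro field_expr _
  unfold Spec_sanitize_var_name_py sanitize_var_name_py sanitize_var_name_py_alt
  rw [pvCore_eq]
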